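-- pv_equiv track=rewrite | github.com/TimCares/MasterThesis | src/kd_precompute/multimodal_data2vec.py | _get_pretrained_block_indices
-- ===== SOURCE A (Python) =====
-- from typing import Dict, Any, Optional, List, Union
--
-- def _get_pretrained_block_indices(depth, n_blocks_pretrained) -> List[int]:
--     blocks_pretrained = [i for i in range(n_blocks_pretrained)]
--     blocks = []
--     pretrained_blocks_count = len(blocks_pretrained)
--
--     if depth*2 > pretrained_blocks_count:
--         pretrained_remaining = pretrained_blocks_count
--         model_remaining = depth
--         current_block_idx = 0
--         while model_remaining*2 > pretrained_remaining and model_remaining > 0: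
--             blocks.append(blocks_pretrained[current_block_idx])
--             pretrained_remaining -= 1
--             model_remaining -= 1
--             current_block_idx += 1
--
--         if model_remaining > 0:
--             for i in range(0, depth-current_block_idx):
--                 take_block_idx = i*2+current_block_idx
--                 blocks.append(blocks_pretrained[take_block_idx])
--     else:
--         for i in range(depth):
--             blocks.append(blocks_pretrained[i*2])
--
--     assert len(blocks) == depth
--
--     return blocks
-- ===== SOURCE B (Python) =====
-- from typing import List
--
-- def _get_pretrained_block_indices(depth, n_blocks_pretrained) -> List[int]:
--     # single pass: the first k positions map 1:1, the rest with stride 2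
--     k = max(0, 2 * depth - n_blocks_pretrained)
--     return [p if p < k else k + (p - k) * 2 for p in range(depth)]
-- ===== Notes on version B (the rewrite author's own statement) =====
-- stated objective: simpler
-- what changed: Replaced A's two-phase counter-driven while-then-for consumption of a materialized index list by one closed-form pass: a single threshold k = max(0, 2*depth - n_blocks_pretrained) decides per position whether to pick 1:1 or with stride 2.
import Mathlib
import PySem

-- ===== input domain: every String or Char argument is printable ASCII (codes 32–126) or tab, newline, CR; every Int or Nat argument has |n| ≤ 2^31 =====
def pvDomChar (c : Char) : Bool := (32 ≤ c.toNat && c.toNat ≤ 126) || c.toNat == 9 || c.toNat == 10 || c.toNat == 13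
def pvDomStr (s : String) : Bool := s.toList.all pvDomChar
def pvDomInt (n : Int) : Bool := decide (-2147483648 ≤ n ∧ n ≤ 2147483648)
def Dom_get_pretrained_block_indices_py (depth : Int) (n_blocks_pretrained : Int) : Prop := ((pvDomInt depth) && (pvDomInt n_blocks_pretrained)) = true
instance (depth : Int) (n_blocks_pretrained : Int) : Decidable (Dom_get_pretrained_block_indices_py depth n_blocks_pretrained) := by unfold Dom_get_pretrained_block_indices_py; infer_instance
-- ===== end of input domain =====

-- B replaces A's two-phase while/for counter loops by one closed-form pass with a
-- threshold k = max(0, 2*depth - n_blocks_pretrained) (objective: simpler).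

-- ===== PORT A =====
-- the while loop, state (blocks, pretrained_remaining, model_remaining, current_block_idx)
def pvAWhile (bp : List Int) (blocks : List Int) (pr mr idx : Int) :
    List Int × Int × Int × Int :=
  if mr * 2 > pr ∧ mr > 0 then
    pvAWhile bp (blocks ++ [PySem.List.pyGetD bp idx 0]) (pr - 1) (mr - 1) (idx + 1)
  else (blocks, pr, mr, idx)
termination_by mr.toNat
decreasing_by omega

def get_pretrained_block_indices_py (depth : Int) (n_blocks_pretrained : Int) : List Int :=
  let blocks_pretrained := PySem.List.pyRange 0 n_blocks_pretrained 1
  let pretrained_blocks_count : Int := blocks_pretrained.length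
  if depth * 2 > pretrained_blocks_count then
    let st := pvAWhile blocks_pretrained [] pretrained_blocks_count depth 0
    let blocks := st.1
    let mr := st.2.2.1
    let current_block_idx := st.2.2.2
    if mr > 0 then
      (PySem.List.pyRange 0 (depth - current_block_idx) 1).foldl
        (fun b i => b ++ [PySem.List.pyGetD blocks_pretrained (i * 2 + current_block_idx) 0]) blocks
    else blocks
  else
    (PySem.List.pyRange 0 depth 1).foldl
      (fun b i => b ++ [PySem.List.pyGetD blocks_pretrained (i * 2) 0]) []

-- ===== PORT B =====
def get_pretrained_block_indices_py_alt (depth : Int) (n_blocks_pretrained : Int) : List Int :=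
  let k := max 0 (2 * depth - n_blocks_pretrained)
  (PySem.List.pyRange 0 depth 1).map (fun p => if p < k then p else k + (p - k) * 2)

-- ===== PRECONDITION & SPEC =====
-- Pre_ excludes exactly the inputs where A raises: AssertionError for depth < 0,
-- IndexError for 0 < depth > n_blocks_pretrained.
def Pre_get_pretrained_block_indices_py (depth : Int) (n_blocks_pretrained : Int) : Prop :=
  0 ≤ depth ∧ (depth = 0 ∨ depth ≤ n_blocks_pretrained)
instance (depth : Int) (n_blocks_pretrained : Int) : Decidable (Pre_get_pretrained_block_indices_py depth n_blocks_pretrained) := by unfold Pre_get_pretrained_block_indices_py; infer_instance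
def pvWitness_get_pretrained_block_indices_py : Int × Int := (3, 4)

def Spec_get_pretrained_block_indices_py (depth : Int) (n_blocks_pretrained : Int) (out : List Int) : Prop := out = get_pretrained_block_indices_py_alt depth n_blocks_pretrained
instance (depth : Int) (n_blocks_pretrained : Int) (out : List Int) : Decidable (Spec_get_pretrained_block_indices_py depth n_blocks_pretrained out) := by unfold Spec_get_pretrained_block_indices_py; infer_instance

-- ===== CLAIM (what is proved, stated in full; the proofs are below) =====
def Claim_equal_get_pretrained_block_indices_py : Prop := ∀ (depth : Int) (n_blocks_pretrained : Int), Dom_get_pretrained_block_indices_py depth n_blocks_pretrained → Pre_get_pretrained_block_indices_py depth n_blocks_pretrained → Spec_get_pretrained_block_indices_py depth n_blocks_pretrained (get_pretrained_block_indices_py depth n_blocks_pretrained)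

-- ===== LEMMAS AND PROOFS =====

theorem pyGetD_pyRange_self (n t : Int) (h0 : 0 ≤ t) (h1 : t < n) :
    PySem.List.pyGetD (PySem.List.pyRange 0 n 1) t 0 = t := by
  simpa using PySem.List.pyGetD_map_pyRange_of_nonneg (fun i => i) n t 0 h0 h1

theorem map_eq_self_of_mem {l : List Int} {f : Int → Int} (h : ∀ p ∈ l, f p = p) :
    l.map f = l := by
  rw [List.map_congr_left h, List.map_id']

theorem pvAWhile_spec (n d : Int) (hd : d ≤ n) :
    ∀ (j : Nat) (t : Int) (blocks : List Int), 0 ≤ t → t + j = 2 * d - n →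
      pvAWhile (PySem.List.pyRange 0 n 1) blocks (n - t) (d - t) t =
        (blocks ++ PySem.List.pyRange t (2 * d - n) 1, n - (2 * d - n), d - (2 * d - n), 2 * d - n) := by
  intro j
  induction j with
  | zero =>
    intro t blocks ht hk
    rw [pvAWhile]
    have hcond : ¬ ((d - t) * 2 > n - t ∧ d - t > 0) := by omega
    rw [if_neg hcond, PySem.List.pyRange_one_eq_nil (by omega)]
    simp only [List.append_nil]
    have h1 : n - t = n - (2 * d - n) := by omega
    have h2 : d - t = d - (2 * d - n) := by omega
    have h3 : t = 2 * d - n := by omega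
    rw [h1, h2, h3]
  | succ j ih =>
    intro t blocks ht hk
    rw [pvAWhile]
    have hcond : (d - t) * 2 > n - t ∧ d - t > 0 := by omega
    rw [if_pos hcond]
    have hget : PySem.List.pyGetD (PySem.List.pyRange 0 n 1) t 0 = t :=
      pyGetD_pyRange_self n t ht (by omega)
    have e1 : n - t - 1 = n - (t + 1) := by omega
    have e2 : d - t - 1 = d - (t + 1) := by omega
    rw [hget, e1, e2, ih (t + 1) (blocks ++ [t]) (by omega) (by omega),
      PySem.List.pyRange_one_cons (by omega : t < 2 * d - n)]
    simp

theorem get_pretrained_block_indices_py_eq (depth n_blocks_pretrained : Int)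
    (hpre : Pre_get_pretrained_block_indices_py depth n_blocks_pretrained) :
    get_pretrained_block_indices_py depth n_blocks_pretrained =
      get_pretrained_block_indices_py_alt depth n_blocks_pretrained := by
  obtain ⟨hd0, hcase⟩ := hpre
  rcases hcase with h0 | hdn
  · -- depth = 0: both are the empty list
    subst h0
    have hlen : (0:Int) ≤ ((PySem.List.pyRange 0 n_blocks_pretrained 1).length : Int) := by
      exact_mod_cast Int.natCast_nonneg _
    unfold get_pretrained_block_indices_py get_pretrained_block_indices_py_alt
    rw [if_neg (by omega : ¬ (0:Int) * 2 > ((PySem.List.pyRange 0 n_blocks_pretrained 1).length : Int)),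
      PySem.List.pyRange_one_eq_nil (le_refl (0:Int))]
    simp
  · -- 0 ≤ depth ≤ n
    set d := depth
    set n := n_blocks_pretrained
    have hn0 : 0 ≤ n := le_trans hd0 hdn
    have hlen : ((PySem.List.pyRange 0 n 1).length : Int) = n := by
      rw [PySem.List.length_pyRange_one]; omega
    unfold get_pretrained_block_indices_py get_pretrained_block_indices_py_alt
    simp only [hlen]
    by_cases hbig : d * 2 > n
    · rw [if_pos hbig]
      -- the while loop picks 0..k-1 one to one, k = 2*d - n
      have hw := pvAWhile_spec n d hdn (2 * d - n).toNat 0 [] le_rfl (by omega)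
      rw [show n - (0:Int) = n by omega, show d - (0:Int) = d by omega] at hw
      rw [hw]
      simp only [List.nil_append]
      have hk : max 0 (2 * d - n) = 2 * d - n := by omega
      rw [hk]
      by_cases hmr : d - (2 * d - n) > 0
      · rw [if_pos hmr, PySem.List.foldl_append_singleton_eq_map,
          PySem.List.pyRange_one_append 0 (2 * d - n) d (by omega) (by omega), List.map_append]
        congr 1
        · -- first k entries map to themselves
          refine (map_eq_self_of_mem ?_).symm
          intro p hp
          rw [PySem.List.mem_pyRange_one] at hp
          simp [if_pos (by omega : p < 2*d-n)]
        · -- stride-2 tail: shift both ranges to List.range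
          rw [PySem.List.pyRange_one 0 (d - (2*d-n)), PySem.List.pyRange_one (2*d-n) d,
            List.map_map, List.map_map]
          simp only [sub_zero, zero_add]
          apply List.map_congr_left
          intro j hj
          rw [List.mem_range] at hj
          have hget : PySem.List.pyGetD (PySem.List.pyRange 0 n 1)
              ((j:Int) * 2 + (2 * d - n)) 0 = (j:Int) * 2 + (2 * d - n) :=
            pyGetD_pyRange_self n _ (by omega) (by omega)
          simp only [Function.comp_apply, hget]
          rw [if_neg (by omega : ¬ ((2*d-n) + (j:Int) < 2*d-n))]
          ring
      · rw [if_neg hmr]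
        -- d = 2*d - n: every position is below the threshold
        rw [show PySem.List.pyRange 0 (2*d-n) 1 = PySem.List.pyRange 0 d 1 by
          congr 1; omega]
        refine (map_eq_self_of_mem ?_).symm
        intro p hp
        rw [PySem.List.mem_pyRange_one] at hp
        simp [if_pos (by omega : p < 2*d-n)]
    · rw [if_neg hbig]
      -- stride-2 everywhere; threshold k = 0
      rw [PySem.List.foldl_append_singleton_eq_map]
      have hk : max 0 (2 * d - n) = 0 := by omega
      rw [hk]
      simp only [List.nil_append]
      apply List.map_congr_left
      intro p hp
      rw [PySem.List.mem_pyRange_one] at hp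
      have hget : PySem.List.pyGetD (PySem.List.pyRange 0 n 1) (p * 2) 0 = p * 2 :=
        pyGetD_pyRange_self n _ (by omega) (by omega)
      rw [hget, if_neg (by omega : ¬ p < 0)]
      ring

-- ===== VERDICT (by name: the statement is the Claim_ definition above) =====
theorem get_pretrained_block_indices_py_spec : Claim_equal_get_pretrained_block_indices_py := by
  intro depth n _ hpre
  exact get_pretrained_block_indices_py_eq depth n hpre
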